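-- pv_equiv track=rewrite | github.com/valleyceo/code_journal | 3. Competition/GCJ/2021/R0/2_MoonsAndUmbrellas.py | computeVal
-- ===== SOURCE A (Python) =====
-- def computeVal(X: int, Y: int, S: str):
-- 	val = 0
--
-- 	for i in range(1, len(S)):
-- 		if S[i-1] == "C" and S[i] == "J":
-- 			val += X
-- 		elif S[i-1] == "J" and S[i] == "C":
-- 			val += Y
--
-- 	return val
-- ===== SOURCE B (Python) =====
-- def computeVal(X: int, Y: int, S: str):
--     # Run-length compress S (drop consecutive duplicates), then sum the
--     # transition costs at run boundaries only; equal-adjacent pairs cost 0.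
--     runs = []
--     for c in S:
--         if not runs or runs[-1] != c:
--             runs.append(c)
--     return sum(X if a == "C" and b == "J" else Y if a == "J" and b == "C" else 0
--                for a, b in zip(runs, runs[1:]))
-- ===== Notes on version B (the rewrite author's own statement) =====
-- stated objective: alternative
-- what changed: B first run-length-compresses S (dropping consecutive duplicate characters) and then sums transition costs only at the boundaries between runs, instead of branching on every adjacent index pair of the raw string; correct because equal-adjacent pairs cost 0.
import Mathlib
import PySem

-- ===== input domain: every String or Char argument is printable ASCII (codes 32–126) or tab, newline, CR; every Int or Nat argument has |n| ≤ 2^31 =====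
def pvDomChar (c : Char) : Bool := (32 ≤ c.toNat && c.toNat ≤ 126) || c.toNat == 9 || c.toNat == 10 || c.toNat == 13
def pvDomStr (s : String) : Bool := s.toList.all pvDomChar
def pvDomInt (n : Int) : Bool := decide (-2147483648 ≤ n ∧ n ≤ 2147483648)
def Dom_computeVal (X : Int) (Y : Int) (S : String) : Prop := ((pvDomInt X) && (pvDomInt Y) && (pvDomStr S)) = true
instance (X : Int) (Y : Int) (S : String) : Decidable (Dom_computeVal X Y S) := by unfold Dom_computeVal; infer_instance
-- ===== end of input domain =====

-- B run-length-compresses S and sums transition costs at run boundaries only (alternative decomposition, same cost).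

-- ===== PORT A =====
-- for i in range(1, len(S)): if S[i-1]=='C' and S[i]=='J': val += X elif S[i-1]=='J' and S[i]=='C': val += Y
def computeVal (X : Int) (Y : Int) (S : String) : Int :=
  (PySem.List.pyRange 1 (PySem.Str.len S) 1).foldl
    (fun val i =>
      if PySem.Str.pyGet? S (i - 1) == some 'C' && PySem.Str.pyGet? S i == some 'J' then val + X
      else if PySem.Str.pyGet? S (i - 1) == some 'J' && PySem.Str.pyGet? S i == some 'C' then val + Y
      else val) 0

-- ===== PORT B =====
-- runs = []; for c in S: if not runs or runs[-1] != c: runs.append(c)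
-- return sum(X if a=='C' and b=='J' else Y if a=='J' and b=='C' else 0 for a,b in zip(runs, runs[1:]))
def computeVal_alt (X : Int) (Y : Int) (S : String) : Int :=
  let runs := S.toList.foldl
    (fun ks c => if ks.isEmpty || !(ks.getLast? == some c) then ks ++ [c] else ks) []
  (runs.zip (runs.drop 1)).foldl
    (fun acc p => acc + (if p.1 = 'C' ∧ p.2 = 'J' then X
                         else if p.1 = 'J' ∧ p.2 = 'C' then Y else 0)) 0

-- ===== PRECONDITION & SPEC =====
def Spec_computeVal (X : Int) (Y : Int) (S : String) (out : Int) : Prop := out = computeVal_alt X Y S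
instance (X : Int) (Y : Int) (S : String) (out : Int) : Decidable (Spec_computeVal X Y S out) := by unfold Spec_computeVal; infer_instance

-- ===== CLAIM (what is proved, stated in full; the proofs are below) =====
def Claim_equal_computeVal : Prop := ∀ (X : Int) (Y : Int) (S : String), Dom_computeVal X Y S → Spec_computeVal X Y S (computeVal X Y S)

-- ===== LEMMAS AND PROOFS =====

-- the cost of one adjacent pair
def cost (X Y : Int) (a b : Char) : Int :=
  if a = 'C' ∧ b = 'J' then X else if a = 'J' ∧ b = 'C' then Y else 0

-- sum of costs of adjacent pairs, head recursion
def sumPairs (X Y : Int) : List Char → Int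
  | a :: b :: t => cost X Y a b + sumPairs X Y (b :: t)
  | _ => 0

-- A's per-pair contribution, as structural recursion over (previous char, rest)
def goA (X Y : Int) (p : Char) : List Char → Int
  | [] => 0
  | c :: t =>
      (if p = 'C' ∧ c = 'J' then X else if p = 'J' ∧ c = 'C' then Y else 0) + goA X Y c t

-- tail of the dedup: elements after a last-kept char p
def dd (p : Char) : List Char → List Char
  | [] => []
  | c :: t => if c = p then dd p t else c :: dd c t

lemma cost_self (X Y : Int) (a : Char) : cost X Y a a = 0 := by
  unfold cost
  by_cases h : a = 'C' <;> by_cases h' : a = 'J' <;> simp_all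

lemma goA_eq_sumPairs (X Y : Int) (p : Char) (t : List Char) :
    goA X Y p t = sumPairs X Y (p :: t) := by
  induction t generalizing p with
  | nil => simp [goA, sumPairs]
  | cons c t ih => rw [goA, ih, sumPairs, cost]

lemma sumPairs_dd (X Y : Int) (p : Char) (t : List Char) :
    sumPairs X Y (p :: dd p t) = sumPairs X Y (p :: t) := by
  induction t generalizing p with
  | nil => simp [dd]
  | cons c t ih =>
      by_cases h : c = p
      · subst h
        rw [dd, if_pos rfl, ih, sumPairs, cost_self, zero_add]
      · rw [dd, if_neg h, sumPairs, ih, sumPairs]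

-- B's dedup fold, with a nonempty accumulator ending in p, appends dd p l
lemma fold_dedup (l : List Char) : ∀ (ks : List Char) (p : Char), ks.getLast? = some p →
    l.foldl (fun ks c => if ks.isEmpty || !(ks.getLast? == some c) then ks ++ [c] else ks) ks
      = ks ++ dd p l := by
  induction l with
  | nil => intro ks p _; simp [dd]
  | cons c t ih =>
      intro ks p hp
      have hne : ks.isEmpty = false := by
        cases ks <;> simp_all
      rw [List.foldl_cons, dd]
      by_cases h : c = p
      · have hc : (ks.isEmpty || !(ks.getLast? == some c)) = false := by
          subst h; simp [hne, hp]
        rw [hc, if_pos h]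
        simpa using ih ks p hp
      · have hc : (ks.isEmpty || !(ks.getLast? == some c)) = true := by
          rw [hne, hp]; simp [Ne.symm h]
        rw [hc, if_neg h]
        simpa using ih (ks ++ [c]) c (by simp)

lemma zip_foldl_eq_sumPairs (X Y : Int) (l : List Char) : ∀ (acc : Int),
    (l.zip (l.drop 1)).foldl
      (fun acc p => acc + (if p.1 = 'C' ∧ p.2 = 'J' then X
                           else if p.1 = 'J' ∧ p.2 = 'C' then Y else 0)) acc
    = acc + sumPairs X Y l := by
  induction l with
  | nil => intro acc; simp [sumPairs]
  | cons a t ih =>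
      intro acc
      cases t with
      | nil => simp [sumPairs]
      | cons b t2 =>
          rw [show ((a :: b :: t2).zip ((a :: b :: t2).drop 1))
                = (a, b) :: ((b :: t2).zip ((b :: t2).drop 1)) from by simp [List.zip]]
          rw [List.foldl_cons, ih, sumPairs, cost]
          ring

-- A's loop over indices (|u|+1 .. len) of a string S with S.toList = u ++ p :: t computes goA p t
lemma loopA (X Y : Int) :
    ∀ (t u : List Char) (p : Char) (S : String), S.toList = u ++ p :: t → ∀ (acc : Int),
      (PySem.List.pyRange ((u.length + 1 : Nat) : Int) ((S.toList.length : Nat) : Int) 1).foldl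
        (fun val i =>
          if PySem.Str.pyGet? S (i - 1) == some 'C'
              && PySem.Str.pyGet? S i == some 'J' then val + X
          else if PySem.Str.pyGet? S (i - 1) == some 'J'
              && PySem.Str.pyGet? S i == some 'C' then val + Y
          else val) acc
      = acc + goA X Y p t := by
  intro t
  induction t with
  | nil =>
      intro u p S hS acc
      rw [PySem.List.pyRange_one_eq_nil (by simp [hS])]
      simp [goA]
  | cons c t ih =>
      intro u p S hS acc
      have hlt : ((u.length + 1 : Nat) : Int) < ((S.toList.length : Nat) : Int) := by
        simp [hS]
      rw [PySem.List.pyRange_one_cons hlt]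
      rw [List.foldl_cons]
      have e1 : PySem.Str.pyGet? S (((u.length + 1 : Nat) : Int) - 1) = some p := by
        rw [show (((u.length + 1 : Nat) : Int) - 1) = ((u.length : Nat) : Int) by push_cast; ring]
        rw [PySem.Str.pyGet?_natCast, hS]
        simp
      have e2 : PySem.Str.pyGet? S ((u.length + 1 : Nat) : Int) = some c := by
        rw [PySem.Str.pyGet?_natCast, hS]
        rw [List.getElem?_append_right (by omega)]
        simp
      have hS' : S.toList = (u ++ [p]) ++ c :: t := by simp [hS]
      have hstep := ih (u ++ [p]) c S hS'
        (if PySem.Str.pyGet? S (((u.length + 1 : Nat) : Int) - 1) == some 'C'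
            && PySem.Str.pyGet? S ((u.length + 1 : Nat) : Int) == some 'J' then acc + X
          else if PySem.Str.pyGet? S (((u.length + 1 : Nat) : Int) - 1) == some 'J'
            && PySem.Str.pyGet? S ((u.length + 1 : Nat) : Int) == some 'C' then acc + Y
          else acc)
      rw [show (((u.length + 1 : Nat) : Int) + 1) = (((u ++ [p]).length + 1 : Nat) : Int) by simp]
      rw [hstep]
      rw [e1, e2, goA]
      by_cases h1 : p = 'C' ∧ c = 'J'
      · obtain ⟨rfl, rfl⟩ := h1
        simp; ring
      · by_cases h2 : p = 'J' ∧ c = 'C'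
        · obtain ⟨rfl, rfl⟩ := h2
          simp; ring
        · have b1 : ((some p == some 'C') && (some c == some 'J')) = false := by
            rcases Decidable.not_and_iff_not_or_not.mp h1 with h | h <;> simp [h]
          have b2 : ((some p == some 'J') && (some c == some 'C')) = false := by
            rcases Decidable.not_and_iff_not_or_not.mp h2 with h | h <;> simp [h]
          rw [b1, b2]
          simp [h1, h2]

-- ===== VERDICT (by name: the statement is the Claim_ definition above) =====
theorem computeVal_spec : Claim_equal_computeVal := by
  intro X Y S _
  unfold Spec_computeVal computeVal
  cases hS : S.toList with
  | nil =>
      rw [PySem.List.pyRange_one_eq_nil (by simp [PySem.Str.len_eq, hS])]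
      simp only [computeVal_alt, hS]
      simp
  | cons p t =>
      have h0 := loopA X Y t [] p S (by simpa using hS) 0
      simp only [List.length_nil, Nat.zero_add, Nat.cast_one] at h0
      rw [PySem.Str.len_eq, h0, goA_eq_sumPairs]
      have key : (p :: t).foldl
          (fun ks c => if ks.isEmpty || !(ks.getLast? == some c) then ks ++ [c] else ks) []
          = p :: dd p t := by
        simpa using fold_dedup t [p] p rfl
      simp only [computeVal_alt, hS, key]
      rw [zip_foldl_eq_sumPairs, sumPairs_dd]
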